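-- pv_equiv track=rewrite | github.com/cwhendrix/College-Projects | CSC370/Homework1.py | incrementCombo
-- ===== SOURCE A (Python) =====
-- def incrementCombo(combo):
--     i = 0
--     while i < len(combo):
--         if combo[i] == "0":
--             combo[i] = "1"
--             break
--         combo[i] = "0"
--         i += 1
--     return combo
-- ===== SOURCE B (Python) =====
-- def incrementCombo(combo):
--     # Divide and conquer: inc(xs) returns (incremented copy, carry_out),
--     # carry_out True iff every element of xs was non-"0" (all became "0").
--     def inc(xs):
--         if not xs:
--             return [], True
--         if len(xs) == 1:
--             return ((["1"], False) if xs[0] == "0" else (["0"], True))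
--         mid = len(xs) // 2
--         left, carry = inc(xs[:mid])
--         if carry:
--             right, carry = inc(xs[mid:])
--             return left + right, carry
--         return left + xs[mid:], False
--     res, _ = inc(combo)
--     combo[:] = res
--     return combo
-- ===== Notes on version B (the rewrite author's own statement) =====
-- stated objective: alternative
-- what changed: B replaces A's in-place left-to-right carry loop by a divide-and-conquer increment: the list is split in half recursively and halves are recombined with an explicit carry bit (carry = the half contained no "0"), building a fresh list.
import Mathlib
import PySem

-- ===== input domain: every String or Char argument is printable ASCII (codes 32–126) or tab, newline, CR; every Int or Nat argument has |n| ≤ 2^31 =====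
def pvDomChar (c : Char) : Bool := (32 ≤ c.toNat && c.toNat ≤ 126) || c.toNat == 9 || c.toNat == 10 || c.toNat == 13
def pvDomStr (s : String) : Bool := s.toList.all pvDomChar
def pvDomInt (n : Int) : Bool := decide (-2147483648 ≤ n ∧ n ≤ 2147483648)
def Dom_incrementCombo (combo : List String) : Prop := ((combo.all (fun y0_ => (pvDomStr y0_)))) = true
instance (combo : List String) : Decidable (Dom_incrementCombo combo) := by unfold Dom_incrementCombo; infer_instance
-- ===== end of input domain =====

-- B replaces A's in-place left-to-right carry loop by a divide-and-conquer increment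
-- (split in half, combine with a carry bit); same returned value, same in-place mutation.


-- ===== PORT A =====
-- A: while i < len(combo): if combo[i]=="0": combo[i]="1"; break else combo[i]="0"; i+=1
-- Transliterated as an index loop over the same mutating list (List.set = item assignment).
def incrementComboGo (combo : List String) (i : Nat) : List String :=
  if h : i < combo.length then
    if combo[i] = "0" then combo.set i "1"
    else incrementComboGo (combo.set i "0") (i + 1)
  else combo
termination_by combo.length - i
decreasing_by simp_all; omega

def incrementCombo (combo : List String) : List String :=
  incrementComboGo combo 0

-- ===== PORT B =====
-- B: divide and conquer; inc xs = (incremented xs, carry out), carry ⇔ no "0" in xs.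
def incrementComboInc (xs : List String) : List String × Bool :=
  match xs with
  | [] => ([], true)
  | [x] => if x = "0" then (["1"], false) else (["0"], true)
  | x :: y :: rest =>
    let l := x :: y :: rest
    let mid := l.length / 2
    let lc := incrementComboInc (l.take mid)
    if lc.2 then
      let rc := incrementComboInc (l.drop mid)
      (lc.1 ++ rc.1, rc.2)
    else (lc.1 ++ l.drop mid, false)
termination_by xs.length
decreasing_by
  all_goals simp only [List.length_take, List.length_drop, List.length_cons]
  all_goals omega

def incrementCombo_alt (combo : List String) : List String :=
  (incrementComboInc combo).1

-- ===== PRECONDITION & SPEC =====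
def Spec_incrementCombo (combo : List String) (out : List String) : Prop := out = incrementCombo_alt combo
instance (combo : List String) (out : List String) : Decidable (Spec_incrementCombo combo out) := by unfold Spec_incrementCombo; infer_instance

-- ===== CLAIM (what is proved, stated in full; the proofs are below) =====
def Claim_equal_incrementCombo : Prop := ∀ (combo : List String), Dom_incrementCombo combo → Spec_incrementCombo combo (incrementCombo combo)

-- ===== LEMMAS AND PROOFS =====

/-- Reference function: the mathematical increment both ports compute. -/
def incRef : List String → List String
  | [] => []
  | x :: xs => if x = "0" then "1" :: xs else "0" :: incRef xs

lemma goA_spec (suf pre : List String) :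
    incrementComboGo (pre ++ suf) pre.length = pre ++ incRef suf := by
  induction suf generalizing pre with
  | nil =>
    rw [incrementComboGo]
    simp [incRef]
  | cons x xs ih =>
    rw [incrementComboGo]
    have hlt : pre.length < (pre ++ x :: xs).length := by simp
    have hget : (pre ++ x :: xs)[pre.length] = x := by
      simp [List.getElem_append_right]
    by_cases hx : x = "0"
    · simp [hx, incRef, List.set_append_right]
    · have hset : (pre ++ x :: xs).set pre.length "0" = (pre ++ ["0"]) ++ xs := by
        simp [List.set_append_right]
      simp only [hlt, dif_pos, hget, hx, if_false, hset]
      have := ih (pre ++ ["0"])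
      simp at this
      simpa [incRef, hx] using this
lemma incRef_all_zero (xs : List String) (h : ∀ x ∈ xs, x ≠ "0") :
    incRef xs = xs.map (fun _ => "0") := by
  induction xs with
  | nil => rfl
  | cons x xs ih => simp [incRef, h x (by simp), ih (fun y hy => h y (by simp [hy]))]

lemma incRef_append_all (xs ys : List String) (h : ∀ x ∈ xs, x ≠ "0") :
    incRef (xs ++ ys) = xs.map (fun _ => "0") ++ incRef ys := by
  induction xs with
  | nil => rfl
  | cons x xs ih => simp [incRef, h x (by simp), ih (fun y hy => h y (by simp [hy]))]

lemma incRef_append_exists (xs ys : List String) (h : ¬ ∀ x ∈ xs, x ≠ "0") :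
    incRef (xs ++ ys) = incRef xs ++ ys := by
  induction xs with
  | nil => simp at h
  | cons x xs ih =>
    by_cases hx : x = "0"
    · simp [incRef, hx]
    · have hxs : ¬ ∀ y ∈ xs, y ≠ "0" := by
        intro hall
        apply h
        intro y hy
        rcases List.mem_cons.mp hy with rfl | hy'
        · exact hx
        · exact hall y hy'
      simp [incRef, hx, ih hxs]

lemma inc_spec (xs : List String) :
    incrementComboInc xs = (incRef xs, decide (∀ x ∈ xs, x ≠ "0")) := by
  induction hn : xs.length using Nat.strong_induction_on generalizing xs with
  | _ n ih =>
  match xs with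
  | [] => simp [incrementComboInc, incRef]
  | [x] =>
    by_cases hx : x = "0" <;> simp [incrementComboInc, incRef, hx]
  | a :: b :: rest =>
    rw [incrementComboInc]
    have hlen : (a :: b :: rest).length = n := hn
    set l := a :: b :: rest with hl
    have h2 : 2 ≤ l.length := by simp [hl]
    have hmidlt : l.length / 2 < l.length := by omega
    have hmidpos : 1 ≤ l.length / 2 := by omega
    have htake : (l.take (l.length / 2)).length < n := by
      simp [List.length_take]; omega
    have hdrop : (l.drop (l.length / 2)).length < n := by
      simp [List.length_drop]; omega
    rw [ih _ htake _ rfl, ih _ hdrop _ rfl]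
    by_cases hc : ∀ x ∈ l.take (l.length / 2), x ≠ "0"
    · rw [if_pos (decide_eq_true hc), incRef_all_zero _ hc]
      refine Prod.ext ?_ ?_
      · show List.map _ _ ++ incRef (l.drop (l.length / 2)) = incRef l
        rw [← incRef_append_all _ _ hc, List.take_append_drop]
      · dsimp only
        rw [decide_eq_decide]
        constructor
        · intro hd x hx
          rcases List.mem_append.mp (by rw [List.take_append_drop]; exact hx :
              x ∈ l.take (l.length / 2) ++ l.drop (l.length / 2)) with h | h
          · exact hc x h
          · exact hd x h
        · intro hall x hx; exact hall x (List.mem_of_mem_drop hx)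
    · rw [if_neg (by simpa using hc)]
      refine Prod.ext ?_ ?_
      · show incRef (l.take (l.length / 2)) ++ l.drop (l.length / 2) = incRef l
        rw [← incRef_append_exists _ (l.drop (l.length / 2)) hc, List.take_append_drop]
      · dsimp only
        symm
        simp only [decide_eq_false_iff_not]
        intro hall; exact hc (fun x hx => hall x (List.mem_of_mem_take hx))

lemma a_eq_b (combo : List String) : incrementCombo combo = incrementCombo_alt combo := by
  have := goA_spec combo []
  simp at this
  rw [incrementCombo, this, incrementCombo_alt, inc_spec]

-- ===== VERDICT (by name: the statement is the Claim_ definition above) =====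
theorem incrementCombo_spec : Claim_equal_incrementCombo := by
  intro combo _
  exact a_eq_b combo
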